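-- pv_equiv track=rewrite | github.com/adampolak/first-fit | runs/results/gen_177/main.py | coverage_cells
-- ===== SOURCE A (Python) =====
-- def coverage_cells(intervals):
--     """Return cells (l,r,count) for coverage between endpoints."""
--     events=[]
--     for l,r in intervals:
--         if l<r:
--             events.append((l,1))
--             events.append((r,-1))
--     if not events:
--         return []
--     events.sort(key=lambda e:(e[0],0 if e[1]==-1 else 1))
--     xs = sorted({x for x,_ in events})
--     idx=0
--     cur=0
--     counts={}
--     for x in xs:
--         while idx<len(events) and events[idx][0]==x:
--             cur+=events[idx][1]
--             idx+=1
--         counts[x]=cur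
--     cells=[]
--     for i in range(len(xs)-1):
--         a,b=xs[i],xs[i+1]
--         m=counts[a]
--         if a<b:
--             cells.append((a,b,m))
--     return cells
-- ===== SOURCE B (Python) =====
-- def coverage_cells(intervals):
--     """Return cells (l,r,count) for coverage between endpoints."""
--     xs = sorted({p for l, r in intervals if l < r for p in (l, r)})
--     return [(a, b, sum(1 for l, r in intervals if l <= a and b <= r))
--             for a, b in zip(xs, xs[1:])]
-- ===== Notes on version B (the rewrite author's own statement) =====
-- stated objective: alternative
-- what changed: Drops the event list, sort-by-delta, prefix sum and counts dict entirely: B sorts the distinct endpoints and, for each consecutive pair (a,b), directly counts the intervals with l<=a and b<=r, so the coverage of each cell is computed independently instead of by a running sweep.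
import Mathlib
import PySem

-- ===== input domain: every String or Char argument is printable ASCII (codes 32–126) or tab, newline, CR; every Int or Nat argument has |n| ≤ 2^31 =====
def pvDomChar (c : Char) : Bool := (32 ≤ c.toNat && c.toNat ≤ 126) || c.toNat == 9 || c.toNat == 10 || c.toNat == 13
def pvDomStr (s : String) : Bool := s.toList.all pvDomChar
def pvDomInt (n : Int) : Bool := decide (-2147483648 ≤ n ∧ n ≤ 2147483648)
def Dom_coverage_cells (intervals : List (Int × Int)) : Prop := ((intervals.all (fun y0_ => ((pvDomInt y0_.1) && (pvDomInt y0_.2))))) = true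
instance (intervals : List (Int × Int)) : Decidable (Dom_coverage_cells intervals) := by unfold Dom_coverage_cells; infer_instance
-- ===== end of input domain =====

-- B drops A's event list, sort, prefix-sum sweep and counts dict: it sorts the distinct
-- endpoints and counts, for each consecutive pair (a,b), the intervals covering that cell
-- directly (objective: alternative algorithm, not claimed faster).

-- ===== PORT A =====
-- the inner `while idx<len(events) and events[idx][0]==x:` loop; `idx` is represented by
-- the remaining suffix of the (sorted) events list, `cur` is threaded unchanged
def pvConsume (x : Int) : List (Int × Int) → Int → List (Int × Int) × Int
  | [], cur => ([], cur)
  | (y, d) :: rest, cur =>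
      if y = x then pvConsume x rest (cur + d) else ((y, d) :: rest, cur)

def coverage_cells (intervals : List (Int × Int)) : List (Int × Int × Int) :=
  let events := intervals.foldl
    (fun ev (p : Int × Int) =>
      if p.1 < p.2 then ev ++ [(p.1, (1 : Int)), (p.2, (-1 : Int))] else ev) []
  if events = [] then []
  else
    let eventsS := PySem.List.sorted2 events (fun e => e.1) (fun e => if e.2 = -1 then (0 : Int) else 1)
    let xs := PySem.List.sorted (PySem.Set.ofList (eventsS.map Prod.fst)) (fun x => x) false
    let st := xs.foldl
      (fun (st : List (Int × Int) × Int × PySem.Dict Int Int) x =>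
        let rc := pvConsume x st.1 st.2.1
        (rc.1, rc.2, st.2.2.insert x rc.2))
      (eventsS, 0, PySem.Dict.empty)
    let counts := st.2.2
    (PySem.List.pyRange 0 ((xs.length : Int) - 1) 1).foldl
      (fun cells i =>
        let a := PySem.List.pyGetD xs i 0
        let b := PySem.List.pyGetD xs (i + 1) 0
        let m := counts.getD a 0     -- counts[a]: the key is always present here
        if a < b then cells ++ [(a, b, m)] else cells) []

-- ===== PORT B =====
def coverage_cells_alt (intervals : List (Int × Int)) : List (Int × Int × Int) :=
  let xs := PySem.List.sorted
    (PySem.Set.ofList (intervals.flatMap (fun p => if p.1 < p.2 then [p.1, p.2] else [])))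
    (fun x => x) false
  (xs.zip (PySem.List.slice xs (some 1) none)).map
    (fun ab => (ab.1, ab.2,
      ((intervals.filter (fun p => decide (p.1 ≤ ab.1) && decide (ab.2 ≤ p.2))).length : Int)))

-- ===== PRECONDITION & SPEC =====
def Spec_coverage_cells (intervals : List (Int × Int)) (out : List (Int × Int × Int)) : Prop := out = coverage_cells_alt intervals
instance (intervals : List (Int × Int)) (out : List (Int × Int × Int)) : Decidable (Spec_coverage_cells intervals out) := by unfold Spec_coverage_cells; infer_instance

-- ===== CLAIM (what is proved, stated in full; the proofs are below) =====
def Claim_equal_coverage_cells : Prop := ∀ (intervals : List (Int × Int)), Dom_coverage_cells intervals → Spec_coverage_cells intervals (coverage_cells intervals)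

-- ===== LEMMAS AND PROOFS =====

-- the canonical event list and the per-endpoint net change
def pvEv (p : Int × Int) : List (Int × Int) :=
  if p.1 < p.2 then [(p.1, (1 : Int)), (p.2, (-1 : Int))] else []

def pvE (intervals : List (Int × Int)) : List (Int × Int) := intervals.flatMap pvEv

def pvG (l : List (Int × Int)) (a : Int) : Int :=
  ((l.filter (fun e => e.1 = a)).map Prod.snd).sum

-- B's per-cell count
def pvCnt (intervals : List (Int × Int)) (a b : Int) : Int :=
  ((intervals.filter (fun p => decide (p.1 ≤ a) && decide (b ≤ p.2))).length : Int)

-- the A-side spine: cells over consecutive sorted endpoints with a running prefix sum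
def pvCells (g : Int → Int) (cur : Int) : List Int → List (Int × Int × Int)
  | a :: b :: t => (a, b, cur + g a) :: pvCells g (cur + g a) (b :: t)
  | _ => []

theorem pvG_perm {l l' : List (Int × Int)} (h : l.Perm l') (a : Int) : pvG l a = pvG l' a := by
  unfold pvG
  exact List.Perm.sum_eq (List.Perm.map _ (List.Perm.filter _ h))

theorem pvCells_congr {g g' : Int → Int} {cur : Int} {xs : List Int}
    (h : ∀ a ∈ xs, g a = g' a) : pvCells g cur xs = pvCells g' cur xs := by
  induction xs generalizing cur with
  | nil => rfl
  | cons a t ih =>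
    cases t with
    | nil => rfl
    | cons b t' =>
      have ha : g a = g' a := h a (by simp)
      simp only [pvCells, ha]
      exact congrArg _ (ih (fun x hx => h x (by simp at hx ⊢; tauto)))

-- A's events foldl is the canonical flatMap
theorem events_eq_pvE_gen (intervals : List (Int × Int)) (acc : List (Int × Int)) :
    intervals.foldl
      (fun ev (p : Int × Int) =>
        if p.1 < p.2 then ev ++ [(p.1, (1 : Int)), (p.2, (-1 : Int))] else ev) acc
      = acc ++ pvE intervals := by
  induction intervals generalizing acc with
  | nil => simp [pvE]
  | cons p t ih =>
    simp only [List.foldl_cons, pvE, List.flatMap_cons, pvEv]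
    split_ifs with hp <;> simp [ih, pvE]

-- B's endpoint pool is the first coordinates of the canonical event list
theorem flatMap_endpoints (intervals : List (Int × Int)) :
    intervals.flatMap (fun p => if p.1 < p.2 then [p.1, p.2] else [])
      = (pvE intervals).map Prod.fst := by
  induction intervals with
  | nil => rfl
  | cons p t ih =>
    simp only [List.flatMap_cons, pvE, pvEv, List.map_append] at *
    split_ifs <;> simp_all

-- insertion sort produces a list pairwise-ordered by the negation of `before`
theorem pairwise_foldl_insertBy {α : Type} (before : α → α → Bool)
    (hasym : ∀ a b, before a b = true → before b a = false)
    (htrans : ∀ a b c, before a b = true → before b c = true → before a c = true)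
    (xs : List α) :
    (xs.foldl (fun acc x => PySem.List.insertBy before x acc) []).Pairwise
      (fun a b => before b a = false) := by
  have hins : ∀ (x : α) (ys : List α), ys.Pairwise (fun a b => before b a = false) →
      (PySem.List.insertBy before x ys).Pairwise (fun a b => before b a = false) := by
    intro x ys h
    induction ys with
    | nil => simp [PySem.List.insertBy]
    | cons y t ih =>
      rw [show PySem.List.insertBy before x (y :: t)
            = if before x y then x :: y :: t else y :: PySem.List.insertBy before x t from rfl]
      split_ifs with hxy
      · refine List.Pairwise.cons ?_ h
        intro e he
        rcases List.mem_cons.mp he with rfl | het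
        · exact hasym _ _ hxy
        · rcases List.pairwise_cons.mp h with ⟨hy, _⟩
          by_contra hex
          exact absurd (htrans _ _ _ (Bool.of_not_eq_false hex) hxy) (by simp [hy e het])
      · rcases List.pairwise_cons.mp h with ⟨hy, ht⟩
        refine List.Pairwise.cons ?_ (ih ht)
        intro e he
        rcases (PySem.List.mem_insertBy before x e t).mp he with rfl | het
        · exact Bool.not_eq_true _ ▸ (by simpa using hxy)
        · exact hy e het
  suffices hgen : ∀ (acc : List α), acc.Pairwise (fun a b => before b a = false) →
      (xs.foldl (fun acc x => PySem.List.insertBy before x acc) acc).Pairwise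
        (fun a b => before b a = false) from hgen [] (by simp)
  induction xs with
  | nil => intro acc h; simpa using h
  | cons x t ih => intro acc h; exact ih _ (hins x acc h)

theorem sorted2_pairwise_fst (events : List (Int × Int)) :
    (PySem.List.sorted2 events (fun e => e.1) (fun e => if e.2 = -1 then (0 : Int) else 1)).Pairwise
      (fun a b => a.1 ≤ b.1) := by
  have h := pairwise_foldl_insertBy
    (fun (a b : Int × Int) => decide (a.1 < b.1) ||
      (!decide (b.1 < a.1) && decide ((if a.2 = -1 then (0:Int) else 1) < (if b.2 = -1 then (0:Int) else 1))))
    (by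
      intro a b hab
      rcases Bool.or_eq_true_iff.mp hab with h1 | h1 <;> simp_all <;> omega)
    (by
      intro a b c hab hbc
      rcases Bool.or_eq_true_iff.mp hab with h1 | h1 <;>
        rcases Bool.or_eq_true_iff.mp hbc with h2 | h2 <;> simp_all <;> omega)
    events
  refine List.Pairwise.imp ?_ h
  intro a b hab
  simp only [Bool.or_eq_false_iff, decide_eq_false_iff_not, not_lt] at hab
  exact hab.1

-- the while-loop consumes exactly the events at coordinate x when x is minimal
theorem pvConsume_spec (x : Int) (evs : List (Int × Int)) (cur : Int)
    (hsort : evs.Pairwise (fun a b => a.1 ≤ b.1))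
    (hmin : ∀ e ∈ evs, x ≤ e.1) :
    pvConsume x evs cur = (evs.filter (fun e => ¬ e.1 = x), cur + pvG evs x) := by
  induction evs generalizing cur with
  | nil => simp [pvConsume, pvG]
  | cons e rest ih =>
    obtain ⟨y, d⟩ := e
    rcases List.pairwise_cons.mp hsort with ⟨hhead, htail⟩
    by_cases hyx : y = x
    · subst hyx
      rw [show pvConsume y ((y, d) :: rest) cur = pvConsume y rest (cur + d) from by
        simp [pvConsume]]
      rw [ih (cur + d) htail (fun e he => hmin e (List.mem_cons_of_mem _ he))]
      have : pvG ((y, d) :: rest) y = d + pvG rest y := by simp [pvG]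
      simp only [List.filter_cons, this]
      refine Prod.ext ?_ ?_ <;> simp
      omega
    · rw [show pvConsume x ((y, d) :: rest) cur = ((y, d) :: rest, cur) from by
        simp [pvConsume, hyx]]
      have hall : ∀ e ∈ (y, d) :: rest, ¬ e.1 = x := by
        intro e he h1
        rcases List.mem_cons.mp he with rfl | het
        · exact hyx h1
        · have h2 := hhead e het
          have h3 := hmin (y, d) List.mem_cons_self
          simp at h2 h3
          omega
      have hfil : ((y, d) :: rest).filter (fun e => ¬ e.1 = x) = (y, d) :: rest :=
        List.filter_eq_self.mpr (by intro e he; simpa using hall e he)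
      have hG : pvG ((y, d) :: rest) x = 0 := by
        unfold pvG
        rw [List.filter_eq_nil_iff.mpr (by intro e he; simpa using hall e he)]
        rfl
      rw [hG]
      simp only [add_zero, Prod.mk.injEq]
      constructor
      · exact (by simpa [Bool.not_eq_true', decide_eq_false_iff_not] using hfil.symm)
      · trivial

-- A's for-x loop never touches a key outside the remaining xs
theorem loopA_getD_frozen (a : Int) (ys : List Int)
    (st : List (Int × Int) × Int × PySem.Dict Int Int) (ha : a ∉ ys) :
    ((ys.foldl
      (fun (st : List (Int × Int) × Int × PySem.Dict Int Int) x =>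
        let rc := pvConsume x st.1 st.2.1
        (rc.1, rc.2, st.2.2.insert x rc.2)) st).2.2).getD a 0 = st.2.2.getD a 0 := by
  induction ys generalizing st with
  | nil => rfl
  | cons y t ih =>
    have hay : a ≠ y := by intro h; exact ha (h ▸ List.mem_cons_self)
    simp only [List.foldl_cons]
    rw [ih _ (fun h => ha (List.mem_cons_of_mem _ h))]
    exact PySem.Dict.getD_insert_of_ne _ _ _ hay

theorem pvG_filter_ne (l : List (Int × Int)) (a x : Int) (hax : a ≠ x) :
    pvG (l.filter (fun e => ¬ e.1 = x)) a = pvG l a := by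
  induction l with
  | nil => rfl
  | cons e t ih =>
    by_cases h1 : e.1 = x <;> by_cases h2 : e.1 = a <;>
      simp_all [pvG]

-- the heart of the A side: pairing consecutive xs with the final counts is the spine
theorem loopA_cells (xs : List Int) (evs : List (Int × Int)) (cur : Int)
    (d : PySem.Dict Int Int)
    (hsort : evs.Pairwise (fun a b => a.1 ≤ b.1))
    (hxs : xs.Pairwise (· < ·))
    (hmem : ∀ e ∈ evs, e.1 ∈ xs) :
    (xs.zip xs.tail).map (fun ab =>
      (ab.1, ab.2,
        ((xs.foldl
          (fun (st : List (Int × Int) × Int × PySem.Dict Int Int) x =>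
            let rc := pvConsume x st.1 st.2.1
            (rc.1, rc.2, st.2.2.insert x rc.2)) (evs, cur, d)).2.2).getD ab.1 0))
      = pvCells (pvG evs) cur xs := by
  induction xs generalizing evs cur d with
  | nil => rfl
  | cons x t ih =>
    cases t with
    | nil => rfl
    | cons b t' =>
      rcases List.pairwise_cons.mp hxs with ⟨hxlt, htpw⟩
      have hmin : ∀ e ∈ evs, x ≤ e.1 := by
        intro e he
        rcases List.mem_cons.mp (hmem e he) with rfl | het
        · exact le_refl _
        · exact le_of_lt (hxlt _ het)
      have hcons := pvConsume_spec x evs cur hsort hmin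
      have hxnot : x ∉ b :: t' := by
        intro hx
        exact absurd (hxlt x hx) (lt_irrefl x)
      rw [List.foldl_cons]
      simp only [hcons, List.tail_cons, List.zip_cons_cons, List.map_cons]
      rw [loopA_getD_frozen x (b :: t') _ hxnot]
      rw [PySem.Dict.getD_insert_self]
      have hsort' : (evs.filter (fun e => ¬ e.1 = x)).Pairwise (fun a b => a.1 ≤ b.1) :=
        List.Pairwise.filter _ hsort
      have hmem' : ∀ e ∈ evs.filter (fun e => ¬ e.1 = x), e.1 ∈ b :: t' := by
        intro e he
        rcases List.mem_filter.mp he with ⟨he1, he2⟩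
        rcases List.mem_cons.mp (hmem e he1) with rfl | het
        · simp at he2
        · exact het
      have hih := ih (evs.filter (fun e => ¬ e.1 = x)) (cur + pvG evs x)
        (d.insert x (cur + pvG evs x)) hsort' htpw hmem'
      rw [show ((b :: t').zip ((b :: t').tail)) = ((b :: t').zip t') from by simp] at hih
      rw [hih]
      have hcong : pvCells (pvG (evs.filter (fun e => ¬ e.1 = x))) (cur + pvG evs x) (b :: t')
          = pvCells (pvG evs) (cur + pvG evs x) (b :: t') := by
        refine pvCells_congr ?_
        intro a ha
        have hax : a ≠ x := by
          intro h; subst h; exact hxnot ha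
        exact pvG_filter_ne evs a x hax
      rw [hcong]
      rfl

-- A's final range loop builds exactly the consecutive-pairs map
theorem rangeA_cells (xs : List Int) (counts : PySem.Dict Int Int)
    (hxs : xs.Pairwise (· < ·)) :
    (PySem.List.pyRange 0 ((xs.length : Int) - 1) 1).foldl
      (fun cells i =>
        let a := PySem.List.pyGetD xs i 0
        let b := PySem.List.pyGetD xs (i + 1) 0
        let m := counts.getD a 0
        if a < b then cells ++ [(a, b, m)] else cells) []
      = (xs.zip xs.tail).map (fun ab => (ab.1, ab.2, counts.getD ab.1 0)) := by
  have hlen : ((xs.length : Int) - 1 - 0).toNat = xs.length - 1 := by omega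
  rw [PySem.List.pyRange_one, List.foldl_map, hlen]
  simp only [zero_add]
  have hlt : ∀ k, k < xs.length - 1 →
      PySem.List.pyGetD xs ((k : Int)) 0 < PySem.List.pyGetD xs ((k : Int) + 1) 0 := by
    intro k hk
    have h2 : ((k : Int)) + 1 = (((k + 1 : Nat)) : Int) := by push_cast; ring
    rw [h2, PySem.List.pyGetD_natCast, PySem.List.pyGetD_natCast]
    have hk1 : k < xs.length := by omega
    have hk2 : k + 1 < xs.length := by omega
    rw [List.getD_eq_getElem xs 0 hk1, List.getD_eq_getElem xs 0 hk2]
    exact List.pairwise_iff_getElem.mp hxs k (k + 1) hk1 hk2 (Nat.lt_succ_self k)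
  rw [PySem.List.foldl_congr_mem _ _ (fun (cells : List (Int × Int × Int)) (k : Nat) =>
      cells ++ [(PySem.List.pyGetD xs (k : Int) 0, PySem.List.pyGetD xs ((k : Int) + 1) 0,
        counts.getD (PySem.List.pyGetD xs (k : Int) 0) 0)]) _
      (by
        intro cells k hkmem
        have hk : k < xs.length - 1 := List.mem_range.mp hkmem
        exact if_pos (hlt k hk))]
  rw [PySem.List.foldl_append_singleton_eq_map, List.nil_append]
  refine List.ext_getElem ?_ ?_
  · simp [List.length_zip]
  · intro k hk1 hk2
    simp only [List.length_map, List.length_range] at hk1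
    have h2 : ((k : Int)) + 1 = (((k + 1 : Nat)) : Int) := by push_cast; ring
    have hklt : k < xs.length := by omega
    have hk1lt : k + 1 < xs.length := by omega
    have hkt : k < xs.tail.length := by simp [List.length_tail]; omega
    simp only [List.getElem_map, List.getElem_range, List.getElem_zip, h2,
      PySem.List.pyGetD_natCast]
    rw [List.getD_eq_getElem xs 0 hklt, List.getD_eq_getElem xs 0 hk1lt, List.getElem_tail]

-- ===== B-side lemmas: the prefix sum of net changes counts the covering intervals =====

theorem sum_map_add (f g : Int → Int) (L : List Int) :
    (L.map (fun x => f x + g x)).sum = (L.map f).sum + (L.map g).sum := by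
  induction L with
  | nil => simp
  | cons y t ih => simp [ih]; ring

theorem pvG_append (l1 l2 : List (Int × Int)) (a : Int) :
    pvG (l1 ++ l2) a = pvG l1 a + pvG l2 a := by
  simp [pvG]

theorem pvCnt_cons (p : Int × Int) (t : List (Int × Int)) (a b : Int) :
    pvCnt (p :: t) a b = (if p.1 ≤ a ∧ b ≤ p.2 then 1 else 0) + pvCnt t a b := by
  simp only [pvCnt, List.filter_cons]
  by_cases h : p.1 ≤ a ∧ b ≤ p.2 <;> simp [h] <;> omega

-- sum of the per-interval net change over a duplicate-free list
theorem sum_pvEv (p : Int × Int) (hp : p.1 < p.2) (L : List Int) (hnd : L.Nodup) :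
    (L.map (pvG (pvEv p))).sum
      = (if p.1 ∈ L then (1 : Int) else 0) + (if p.2 ∈ L then (-1 : Int) else 0) := by
  have hne : p.1 ≠ p.2 := ne_of_lt hp
  induction L with
  | nil => simp
  | cons y t ih =>
    rcases List.nodup_cons.mp hnd with ⟨hy, ht⟩
    have hstep : pvG (pvEv p) y
        = (if p.1 = y then (1 : Int) else 0) + (if p.2 = y then (-1 : Int) else 0) := by
      simp only [pvEv, if_pos hp, pvG]
      by_cases h1 : p.1 = y <;> by_cases h2 : p.2 = y <;> simp_all
    simp only [List.map_cons, List.sum_cons, ih ht, hstep, List.mem_cons]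
    by_cases h1 : p.1 = y <;> by_cases h2 : p.2 = y <;>
      by_cases h3 : p.1 ∈ t <;> by_cases h4 : p.2 ∈ t <;>
        simp_all

theorem sum_map_pvG_nil (L : List Int) : (L.map (pvG [])).sum = 0 := by
  induction L with
  | nil => rfl
  | cons y t ih => simp [pvG, ih]

-- one interval's contribution to the prefix sum up to a is exactly "covers cell (a,b)"
theorem sum_prefix_single (p : Int × Int) (done : List Int) (a b : Int) (t : List Int)
    (hs : (done ++ a :: b :: t).Pairwise (· < ·))
    (hcov : ∀ e ∈ pvEv p, e.1 ∈ done ++ a :: b :: t) :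
    ((done ++ [a]).map (pvG (pvEv p))).sum = if p.1 ≤ a ∧ b ≤ p.2 then 1 else 0 := by
  rcases List.pairwise_append.mp hs with ⟨pdone, ptail, hcross⟩
  rcases List.pairwise_cons.mp ptail with ⟨halt, ptail'⟩
  rcases List.pairwise_cons.mp ptail' with ⟨hblt, _⟩
  have hab : a < b := halt b (by simp)
  have hdone : ∀ x ∈ done, x < a := fun x hx => hcross x hx a (by simp)
  have htail : ∀ x ∈ b :: t, a < x := by
    intro x hx
    rcases List.mem_cons.mp hx with rfl | hxt
    · exact hab
    · exact halt x (by simp [hxt])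
  have htailb : ∀ x ∈ b :: t, b ≤ x := by
    intro x hx
    rcases List.mem_cons.mp hx with rfl | hxt
    · exact le_refl _
    · exact le_of_lt (hblt x hxt)
  have hmemL : ∀ c, c ∈ done ++ a :: b :: t → (c ∈ done ++ [a] ↔ c ≤ a) := by
    intro c hc
    constructor
    · intro h
      rcases List.mem_append.mp h with h | h
      · exact le_of_lt (hdone c h)
      · simp at h; omega
    · intro hle
      rcases List.mem_append.mp hc with h | h
      · exact List.mem_append.mpr (Or.inl h)
      · rcases List.mem_cons.mp h with rfl | h
        · simp
        · exact absurd (htail c h) (by omega)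
  have hnd : (done ++ [a]).Nodup := by
    have : (done ++ [a]).Pairwise (· < ·) := by
      rw [List.pairwise_append]
      exact ⟨pdone, by simp, by intro x hx y hy; simp at hy; subst hy; exact hdone x hx⟩
    exact this.imp ne_of_lt
  by_cases hp : p.1 < p.2
  · have h1mem : p.1 ∈ done ++ a :: b :: t := by
      have := hcov (p.1, 1) (by simp [pvEv, hp])
      simpa using this
    have h2mem : p.2 ∈ done ++ a :: b :: t := by
      have := hcov (p.2, -1) (by simp [pvEv, hp])
      simpa using this
    rw [sum_pvEv p hp _ hnd]
    rw [if_congr (hmemL p.1 h1mem) rfl rfl, if_congr (hmemL p.2 h2mem) rfl rfl]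
    have hdich : p.2 ≤ a ∨ b ≤ p.2 := by
      rcases List.mem_append.mp h2mem with h | h
      · exact Or.inl (le_of_lt (hdone _ h))
      · rcases List.mem_cons.mp h with rfl | h
        · exact Or.inl (le_refl _)
        · exact Or.inr (htailb _ h)
    split_ifs <;> omega
  · have hc : ¬ (p.1 ≤ a ∧ b ≤ p.2) := by
      rintro ⟨h1, h2⟩; exact hp (by omega)
    rw [if_neg hc]
    have hev : pvEv p = [] := by simp [pvEv, hp]
    rw [hev]
    exact sum_map_pvG_nil (done ++ [a])

theorem sum_prefix_eq_cnt (intervals : List (Int × Int)) (done : List Int) (a b : Int)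
    (t : List Int)
    (hs : (done ++ a :: b :: t).Pairwise (· < ·))
    (hcov : ∀ e ∈ pvE intervals, e.1 ∈ done ++ a :: b :: t) :
    ((done ++ [a]).map (pvG (pvE intervals))).sum = pvCnt intervals a b := by
  induction intervals with
  | nil =>
    rw [show pvE ([] : List (Int × Int)) = [] from rfl, show pvCnt [] a b = 0 from rfl]
    exact sum_map_pvG_nil (done ++ [a])
  | cons p rest ih =>
    have hPE : pvE (p :: rest) = pvEv p ++ pvE rest := rfl
    have hcov1 : ∀ e ∈ pvEv p, e.1 ∈ done ++ a :: b :: t := by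
      intro e he
      exact hcov e (by rw [hPE]; exact List.mem_append.mpr (Or.inl he))
    have hcov2 : ∀ e ∈ pvE rest, e.1 ∈ done ++ a :: b :: t := by
      intro e he
      exact hcov e (by rw [hPE]; exact List.mem_append.mpr (Or.inr he))
    have hsplit : (done ++ [a]).map (pvG (pvE (p :: rest)))
        = (done ++ [a]).map (fun x => pvG (pvEv p) x + pvG (pvE rest) x) := by
      refine List.map_congr_left ?_
      intro x _
      rw [hPE, pvG_append]
    rw [hsplit, sum_map_add, pvCnt_cons,
      sum_prefix_single p done a b t hs hcov1, ih hcov2]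

-- the sweep spine equals B's independent per-cell counts
theorem pvCells_eq_cnt (intervals : List (Int × Int)) (done rest : List Int)
    (hs : (done ++ rest).Pairwise (· < ·))
    (hcov : ∀ e ∈ pvE intervals, e.1 ∈ done ++ rest) :
    pvCells (pvG (pvE intervals)) ((done.map (pvG (pvE intervals))).sum) rest
      = (rest.zip rest.tail).map (fun ab => (ab.1, ab.2, pvCnt intervals ab.1 ab.2)) := by
  induction rest generalizing done with
  | nil => rfl
  | cons a t ih =>
    cases t with
    | nil => rfl
    | cons b t' =>
      have hcur : (done.map (pvG (pvE intervals))).sum + pvG (pvE intervals) a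
          = ((done ++ [a]).map (pvG (pvE intervals))).sum := by simp
      simp only [pvCells, List.tail_cons, List.zip_cons_cons, List.map_cons]
      have hs' : ((done ++ [a]) ++ b :: t').Pairwise (· < ·) := by
        simpa [List.append_assoc] using hs
      have hcov' : ∀ e ∈ pvE intervals, e.1 ∈ (done ++ [a]) ++ b :: t' := by
        intro e he
        simpa [List.append_assoc] using hcov e he
      have hhead := sum_prefix_eq_cnt intervals done a b t' hs hcov
      have htail := ih (done ++ [a]) hs' hcov'
      rw [show ((b :: t').zip ((b :: t').tail)) = ((b :: t').zip t') from by simp] at htail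
      rw [hcur, htail, hhead]

-- ===== VERDICT (by name: the statement is the Claim_ definition above) =====
theorem coverage_cells_spec : Claim_equal_coverage_cells := by
  intro intervals _
  unfold Spec_coverage_cells coverage_cells coverage_cells_alt
  simp only []
  rw [events_eq_pvE_gen intervals [], List.nil_append, flatMap_endpoints]
  by_cases h : pvE intervals = []
  · rw [if_pos h, h]
    simp [PySem.Set.ofList, PySem.List.sorted, PySem.List.slice]
  · rw [if_neg h]
    -- A side to the sweep spine over the sorted distinct endpoints
    rw [rangeA_cells _ _ (PySem.List.sorted_ofList_pairwise_lt _)]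
    rw [loopA_cells _ _ _ _ (sorted2_pairwise_fst (pvE intervals))
      (PySem.List.sorted_ofList_pairwise_lt _)
      (by
        intro e he
        rw [PySem.List.mem_sorted, PySem.Set.mem_ofList]
        exact List.mem_map_of_mem he)]
    have hperm : (PySem.List.sorted2 (pvE intervals) (fun e => e.1)
        (fun e => if e.2 = -1 then (0 : Int) else 1)).Perm (pvE intervals) :=
      PySem.List.sorted2_perm _ _ _ _
    have hxs : PySem.List.sorted
        (PySem.Set.ofList ((PySem.List.sorted2 (pvE intervals) (fun e => e.1)
          (fun e => if e.2 = -1 then (0 : Int) else 1)).map Prod.fst)) (fun x => x) false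
        = PySem.List.sorted (PySem.Set.ofList ((pvE intervals).map Prod.fst)) (fun x => x) false := by
      refine PySem.List.sorted_eq_sorted_of_perm _ _ _ (fun a b hab => hab) ?_
      refine (List.perm_ext_iff_of_nodup (PySem.Set.nodup_ofList _) (PySem.Set.nodup_ofList _)).mpr ?_
      intro a
      rw [PySem.Set.mem_ofList, PySem.Set.mem_ofList]
      exact (hperm.map Prod.fst).mem_iff
    rw [hxs]
    rw [pvCells_congr (fun a _ => pvG_perm hperm a)]
    -- B side: slice → tail, then the spine-to-counts bridge
    rw [PySem.List.slice_from_one]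
    have hs : (PySem.List.sorted (PySem.Set.ofList ((pvE intervals).map Prod.fst))
        (fun x => x) false).Pairwise (· < ·) := PySem.List.sorted_ofList_pairwise_lt _
    have hcov : ∀ e ∈ pvE intervals,
        e.1 ∈ PySem.List.sorted (PySem.Set.ofList ((pvE intervals).map Prod.fst))
          (fun x => x) false := by
      intro e he
      rw [PySem.List.mem_sorted, PySem.Set.mem_ofList]
      exact List.mem_map_of_mem he
    have hmain := pvCells_eq_cnt intervals []
      (PySem.List.sorted (PySem.Set.ofList ((pvE intervals).map Prod.fst)) (fun x => x) false)
      (by simpa using hs) (by simpa using hcov)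
    simp only [List.map_nil, List.sum_nil] at hmain
    rw [hmain]
    rfl
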